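-- pv_equiv track=rewrite | github.com/vitalyslipko/study_repo | dz_08/py_charm.py | mane_function
-- ===== SOURCE A (Python) =====
-- def mane_function(x, y):
--     if x == y:
--         return 0
--     a = 0
--     while a < x and x <= y:
--         a += 1
--         a = a * 2
--     return a
-- ===== SOURCE B (Python) =====
-- def mane_function(x, y):
--     # Closed form: the loop of A returns the smallest 2**p - 2 (p >= 1) that is >= x,
--     # and 0 whenever the loop body never runs (x >= y or x <= 0).
--     if x >= y or x <= 0:
--         return 0
--     return (1 << (x + 1).bit_length()) - 2
-- ===== Notes on version B (the rewrite author's own statement) =====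
-- stated objective: simpler
-- what changed: Replaces the doubling while-loop with a closed form: guards return 0 when x >= y or x <= 0, otherwise the answer 2^bit_length(x+1) - 2 is computed directly.
import Mathlib
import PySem

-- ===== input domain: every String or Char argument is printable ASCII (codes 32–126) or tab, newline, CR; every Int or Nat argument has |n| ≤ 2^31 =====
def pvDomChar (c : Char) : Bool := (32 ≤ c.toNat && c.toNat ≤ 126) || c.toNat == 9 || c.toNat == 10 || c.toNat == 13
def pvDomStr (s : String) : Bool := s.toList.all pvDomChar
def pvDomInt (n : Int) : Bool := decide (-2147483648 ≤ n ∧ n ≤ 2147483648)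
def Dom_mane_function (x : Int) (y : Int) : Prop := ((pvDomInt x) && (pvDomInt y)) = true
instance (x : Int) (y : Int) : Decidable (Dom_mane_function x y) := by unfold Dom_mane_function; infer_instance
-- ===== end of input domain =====

-- B replaces A's doubling while-loop by guards plus the closed form 2^bit_length(x+1) - 2 (objective: simpler).

-- ===== PORT A =====
-- A's while-loop 'while a < x and x <= y: a += 1; a = a * 2', transliterated with a fuel
-- bound (x.toNat + 1 iterations always suffice: a grows by at least 2 each pass from 0).
def maneLoopA : Nat → Int → Int → Int → Int
  | 0, _, _, a => a
  | fuel + 1, x, y, a => if a < x ∧ x ≤ y then maneLoopA fuel x y (2 * (a + 1)) else a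

def mane_function (x : Int) (y : Int) : Int :=
  if x = y then 0 else maneLoopA (x.toNat + 1) x y 0

-- ===== PORT B =====
def mane_function_alt (x : Int) (y : Int) : Int :=
  if x ≥ y ∨ x ≤ 0 then 0
  else ((2 ^ Nat.size ((x + 1).toNat) : Nat) : Int) - 2

-- ===== PRECONDITION & SPEC =====
def Spec_mane_function (x : Int) (y : Int) (out : Int) : Prop := out = mane_function_alt x y
instance (x : Int) (y : Int) (out : Int) : Decidable (Spec_mane_function x y out) := by unfold Spec_mane_function; infer_instance

-- ===== CLAIM (what is proved, stated in full; the proofs are below) =====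
def Claim_equal_mane_function : Prop := ∀ (x : Int) (y : Int), Dom_mane_function x y → Spec_mane_function x y (mane_function x y)

-- ===== LEMMAS AND PROOFS =====

-- Invariant: starting from a = 2^k - 2 with 2^(k-1) ≤ x+1 and enough fuel, the loop
-- returns 2^(size (x+1)) - 2, the smallest value of that shape that is ≥ x.
theorem maneLoopA_closed (fuel : Nat) : ∀ (k : Nat) (x y : Int), 0 < x → x ≤ y →
    ((2 ^ (k - 1) : Nat) : Int) ≤ x + 1 → x + 2 ≤ ((2 ^ (k + fuel) : Nat) : Int) →
    maneLoopA fuel x y (((2 ^ k : Nat) : Int) - 2) = ((2 ^ Nat.size ((x + 1).toNat) : Nat) : Int) - 2 := by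
  induction fuel with
  | zero =>
    intro k x y hx hxy hlo hhi
    rw [Nat.add_zero] at hhi
    have hk : Nat.size ((x + 1).toNat) = k := by
      have h1 : (x + 1).toNat < 2 ^ k := by omega
      have h2 : 2 ^ (k - 1) ≤ (x + 1).toNat := by omega
      have hkpos : 0 < k := by
        by_contra h
        have : k = 0 := by omega
        subst this
        simp at h1
        omega
      have ha := Nat.size_le.mpr h1
      have hb : k - 1 < Nat.size ((x + 1).toNat) := Nat.lt_size.mpr h2
      omega
    simp [maneLoopA, hk]
  | succ fuel ih =>
    intro k x y hx hxy hlo hhi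
    by_cases hlt : ((2 ^ k : Nat) : Int) - 2 < x
    · have step : (2 : Int) * ((((2 ^ k : Nat) : Int) - 2) + 1) = ((2 ^ (k + 1) : Nat) : Int) - 2 := by
        push_cast [pow_succ]; ring
      rw [maneLoopA, if_pos ⟨hlt, hxy⟩, step]
      have hlo' : ((2 ^ ((k + 1) - 1) : Nat) : Int) ≤ x + 1 := by
        have hk1 : (k + 1) - 1 = k := rfl
        rw [hk1]; omega
      have hhi' : x + 2 ≤ ((2 ^ (k + 1 + fuel) : Nat) : Int) := by
        have : k + 1 + fuel = k + (fuel + 1) := by omega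
        rw [this]; exact hhi
      exact ih (k + 1) x y hx hxy hlo' hhi'
    · rw [maneLoopA, if_neg (by tauto)]
      have hk : Nat.size ((x + 1).toNat) = k := by
        have h1 : (x + 1).toNat < 2 ^ k := by omega
        have h2 : 2 ^ (k - 1) ≤ (x + 1).toNat := by omega
        have hkpos : 0 < k := by
          by_contra h
          have : k = 0 := by omega
          subst this
          simp at h1
          omega
        have ha := Nat.size_le.mpr h1
        have hb : k - 1 < Nat.size ((x + 1).toNat) := Nat.lt_size.mpr h2
        omega
      rw [hk]

theorem maneLoopA_dead (fuel : Nat) (x y : Int) (h : ¬ (0 < x ∧ x ≤ y)) :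
    maneLoopA fuel x y 0 = 0 := by
  cases fuel with
  | zero => rfl
  | succ fuel => rw [maneLoopA, if_neg (by omega)]

-- ===== VERDICT (by name: the statement is the Claim_ definition above) =====
theorem mane_function_spec : Claim_equal_mane_function := by
  intro x y _
  unfold Spec_mane_function mane_function mane_function_alt
  by_cases hxy : x = y
  · rw [if_pos hxy, if_pos (Or.inl (le_of_eq hxy.symm))]
  · rw [if_neg hxy]
    by_cases hrun : 0 < x ∧ x < y
    · rw [if_neg (by omega)]
      have h0 : ((2 ^ 1 : Nat) : Int) - 2 = 0 := by norm_num
      have hlo : ((2 ^ (1 - 1) : Nat) : Int) ≤ x + 1 := by norm_num; omega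
      have hhi : x + 2 ≤ ((2 ^ (1 + (x.toNat + 1)) : Nat) : Int) := by
        have h1 : x.toNat + 2 < 2 ^ (x.toNat + 2) := Nat.lt_two_pow_self
        have h2 : 1 + (x.toNat + 1) = x.toNat + 2 := by omega
        rw [h2]
        omega
      have := maneLoopA_closed (x.toNat + 1) 1 x y hrun.1 (le_of_lt hrun.2) hlo hhi
      rw [h0] at this
      rw [this]
    · rw [if_pos (by omega), maneLoopA_dead _ _ _ (by omega)]
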